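-- pv_equiv track=rewrite | github.com/MrBrantCode/unitest_baseline | mut_generate/mist_train_cf/cf_20037/solution.py | convert_to_nested_dict
-- ===== SOURCE A (Python) =====
-- def convert_to_nested_dict(country_data):
--     """
--     This function converts a list of country data into a nested dictionary.
--
--     Args:
--     country_data (list): A list of lists, where each sublist contains a country name,
--                          a continent name, and a population.
--
--     Returns:
--     dict: A nested dictionary where the top-level keys are the continent names, and
--           the values are dictionaries with the country names as keys and their
--           populations as values.
--     """
--
--     result = {}
--
--     for item in country_data:
--         country = item[0]
--         continent = item[1]
--         population = item[2]
--
--         if continent not in result: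
--             result[continent] = {}
--
--         result[continent][country] = population
--
--     return result
-- ===== SOURCE B (Python) =====
-- def convert_to_nested_dict(country_data):
--     # Two-phase group-by: first collect the continents in first-appearance
--     # order, then build each continent's inner dict in one comprehension.
--     continents = dict.fromkeys(item[1] for item in country_data)
--     return {c: {item[0]: item[2] for item in country_data if item[1] == c}
--             for c in continents}
-- ===== Notes on version B (the rewrite author's own statement) =====
-- stated objective: alternative
-- what changed: Replaces A's single streaming pass of nested-dict insertions with a two-phase group-by: one pass collects the distinct continents (dict.fromkeys), then a dict comprehension builds each continent's inner dict by filtering the list.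
import Mathlib
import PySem

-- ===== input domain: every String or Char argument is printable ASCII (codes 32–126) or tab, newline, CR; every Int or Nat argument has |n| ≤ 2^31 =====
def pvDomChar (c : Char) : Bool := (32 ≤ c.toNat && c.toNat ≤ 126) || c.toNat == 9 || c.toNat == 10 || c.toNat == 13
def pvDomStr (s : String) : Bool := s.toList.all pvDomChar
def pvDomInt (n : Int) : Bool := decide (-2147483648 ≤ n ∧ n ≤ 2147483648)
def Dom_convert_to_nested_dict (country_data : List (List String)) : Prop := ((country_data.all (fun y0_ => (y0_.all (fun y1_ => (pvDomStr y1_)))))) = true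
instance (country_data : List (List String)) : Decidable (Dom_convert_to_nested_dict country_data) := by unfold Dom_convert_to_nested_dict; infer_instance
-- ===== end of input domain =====

-- B replaces A's single streaming pass of nested-dict insertions with a two-phase
-- group-by (collect distinct continents, then build each inner dict by filtering);
-- an alternative decomposition, not claimed faster.

-- ===== PORT A =====
-- A: one pass; result[continent] created if absent, then result[continent][country] = population.
def convert_to_nested_dict (country_data : List (List String)) : List (String × List (String × String)) :=
  (country_data.foldl
    (fun result item =>
      let country := PySem.List.pyGetD item 0 ""
      let continent := PySem.List.pyGetD item 1 ""
      let population := PySem.List.pyGetD item 2 ""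
      let result := if result.contains continent then result else result.insert continent PySem.Dict.empty
      result.insert continent ((result.getD continent PySem.Dict.empty).insert country population))
    PySem.Dict.empty).items.map (fun p => (p.1, p.2.items))

-- ===== PORT B =====
-- B: continents = dict.fromkeys(item[1] …) → ordered dedup; then one inner dict per continent.
def convert_to_nested_dict_alt (country_data : List (List String)) : List (String × List (String × String)) :=
  (PySem.List.dedup (country_data.map (fun item => PySem.List.pyGetD item 1 ""))).map
    (fun c =>
      (c, (country_data.foldl
            (fun m item =>
              if PySem.List.pyGetD item 1 "" == c then
                m.insert (PySem.List.pyGetD item 0 "") (PySem.List.pyGetD item 2 "")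
              else m)
            PySem.Dict.empty).items))

-- ===== PRECONDITION & SPEC =====
-- Pre_ excludes exactly the inputs where Python A raises IndexError: a row with fewer than 3 fields.
def Pre_convert_to_nested_dict (country_data : List (List String)) : Prop :=
  ∀ item ∈ country_data, 3 ≤ item.length
instance (country_data : List (List String)) : Decidable (Pre_convert_to_nested_dict country_data) := by unfold Pre_convert_to_nested_dict; infer_instance
def pvWitness_convert_to_nested_dict : List (List String) := [["France", "Europe", "67"], ["Japan", "Asia", "125"], ["Spain", "Europe", "47"]]

def Spec_convert_to_nested_dict (country_data : List (List String)) (out : List (String × List (String × String))) : Prop := out = convert_to_nested_dict_alt country_data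
instance (country_data : List (List String)) (out : List (String × List (String × String))) : Decidable (Spec_convert_to_nested_dict country_data out) := by unfold Spec_convert_to_nested_dict; infer_instance

-- ===== CLAIM (what is proved, stated in full; the proofs are below) =====
def Claim_equal_convert_to_nested_dict : Prop := ∀ (country_data : List (List String)), Dom_convert_to_nested_dict country_data → Pre_convert_to_nested_dict country_data → Spec_convert_to_nested_dict country_data (convert_to_nested_dict country_data)

-- ===== LEMMAS AND PROOFS =====

-- A's loop step and B's inner-loop step, named for the proofs.
def pvStepA (d : PySem.Dict String (PySem.Dict String String)) (item : List String) : PySem.Dict String (PySem.Dict String String) :=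
  d.insert (PySem.List.pyGetD item 1 "")
    ((d.getD (PySem.List.pyGetD item 1 "") PySem.Dict.empty).insert (PySem.List.pyGetD item 0 "") (PySem.List.pyGetD item 2 ""))

def pvStepB (c : String) (m : PySem.Dict String String) (item : List String) : PySem.Dict String String :=
  if PySem.List.pyGetD item 1 "" == c then
    m.insert (PySem.List.pyGetD item 0 "") (PySem.List.pyGetD item 2 "")
  else m

-- A's loop body (create-if-absent, then set) collapses to the single nested insert pvStepA.
theorem pvBodyA_eq :
    (fun (result : PySem.Dict String (PySem.Dict String String)) (item : List String) =>
      let country := PySem.List.pyGetD item 0 ""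
      let continent := PySem.List.pyGetD item 1 ""
      let population := PySem.List.pyGetD item 2 ""
      let result := if result.contains continent then result else result.insert continent PySem.Dict.empty
      result.insert continent ((result.getD continent PySem.Dict.empty).insert country population)) = pvStepA := by
  funext d item
  by_cases h : d.contains (PySem.List.pyGetD item 1 "") = true
  · simp [pvStepA, h]
  · simp only [h, Bool.false_eq_true, if_false]
    rw [PySem.Dict.getD_insert_self, PySem.Dict.insert_insert_self, pvStepA,
      PySem.Dict.getD_of_not_contains d PySem.Dict.empty (by simpa using h)]

-- The value at any continent c after A's loop is B's filtered inner fold.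
theorem pvGetD_foldA (cd : List (List String)) (d : PySem.Dict String (PySem.Dict String String)) (c : String) :
    (cd.foldl pvStepA d).getD c PySem.Dict.empty =
    cd.foldl (pvStepB c) (d.getD c PySem.Dict.empty) := by
  induction cd generalizing d with
  | nil => rfl
  | cons i rest ih =>
    rw [List.foldl_cons, List.foldl_cons, ih]
    congr 1
    by_cases h : PySem.List.pyGetD i 1 "" = c
    · simp [pvStepA, pvStepB, h, PySem.Dict.getD_insert_self]
    · rw [pvStepA, PySem.Dict.getD_insert_of_ne _ _ _ (fun hc => h hc.symm)]
      simp [pvStepB, h]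

theorem convert_to_nested_dict_spec : Claim_equal_convert_to_nested_dict := by
  intro cd _ _
  unfold Spec_convert_to_nested_dict convert_to_nested_dict convert_to_nested_dict_alt
  rw [pvBodyA_eq]
  have hnodup : (cd.foldl pvStepA PySem.Dict.empty).keys.Nodup := by
    exact PySem.Dict.nodup_keys_foldl_insert_key cd (fun item => PySem.List.pyGetD item 1 "")
      (fun d item => (d.getD (PySem.List.pyGetD item 1 "") PySem.Dict.empty).insert
        (PySem.List.pyGetD item 0 "") (PySem.List.pyGetD item 2 "")) PySem.Dict.empty
      (by simp)
  have hkeys : (cd.foldl pvStepA PySem.Dict.empty).keys =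
      PySem.List.dedup (cd.map (fun item => PySem.List.pyGetD item 1 "")) := by
    rw [show pvStepA = (fun d item => d.insert ((fun item => PySem.List.pyGetD item 1 "") item)
        ((fun (d : PySem.Dict String (PySem.Dict String String)) item =>
          (d.getD (PySem.List.pyGetD item 1 "") PySem.Dict.empty).insert
            (PySem.List.pyGetD item 0 "") (PySem.List.pyGetD item 2 "")) d item)) from rfl,
      PySem.Dict.keys_foldl_insert_key]
    rfl
  rw [PySem.Dict.items_eq_map_keys _ hnodup PySem.Dict.empty, List.map_map, hkeys]
  refine List.map_congr_left (fun c _ => ?_)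
  simp only [Function.comp]
  rw [pvGetD_foldA, PySem.Dict.getD_empty]
  rfl
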